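-- pv_equiv track=rewrite | github.com/tigrbl/tigrbl | tools/ci/generate_feature_cells.py | related_ids
-- ===== SOURCE A (Python) =====
-- def related_ids(
--     feature: dict,
--     claims_by_id: dict[str, dict],
--     tests_by_id: dict[str, dict],
--     evidence_by_id: dict[str, dict],
-- ) -> tuple[set[str], set[str]]:
--     test_ids = set(feature.get("test_ids", []))
--     evidence_ids: set[str] = set()
--
--     for claim_id in feature.get("claim_ids", []):
--         claim = claims_by_id.get(claim_id, {})
--         test_ids.update(claim.get("test_ids", []))
--         evidence_ids.update(claim.get("evidence_ids", []))
--
--     previous_state: tuple[int, int] | None = None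
--     while previous_state != (len(test_ids), len(evidence_ids)):
--         previous_state = (len(test_ids), len(evidence_ids))
--         for test_id in tuple(test_ids):
--             test = tests_by_id.get(test_id, {})
--             evidence_ids.update(test.get("evidence_ids", []))
--         for evidence_id in tuple(evidence_ids):
--             evidence = evidence_by_id.get(evidence_id, {})
--             test_ids.update(evidence.get("test_ids", []))
--
--     return test_ids, evidence_ids
-- ===== SOURCE B (Python) =====
-- def related_ids(
--     feature: dict,
--     claims_by_id: dict[str, dict],
--     tests_by_id: dict[str, dict],
--     evidence_by_id: dict[str, dict],
-- ) -> tuple[set[str], set[str]]: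
--     # Worklist closure: each id is scanned exactly once, only newly-added ids
--     # are processed each round instead of rescanning the full sets.
--     test_ids: set[str] = set()
--     evidence_ids: set[str] = set()
--     pending_tests: list[str] = []
--     pending_evidence: list[str] = []
--
--     for test_id in feature.get("test_ids", []):
--         if test_id not in test_ids:
--             test_ids.add(test_id)
--             pending_tests.append(test_id)
--     for claim_id in feature.get("claim_ids", []):
--         claim = claims_by_id.get(claim_id, {})
--         for test_id in claim.get("test_ids", []):
--             if test_id not in test_ids:
--                 test_ids.add(test_id)
--                 pending_tests.append(test_id)
--         for evidence_id in claim.get("evidence_ids", []):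
--             if evidence_id not in evidence_ids:
--                 evidence_ids.add(evidence_id)
--                 pending_evidence.append(evidence_id)
--
--     while pending_tests or pending_evidence:
--         new_evidence: list[str] = []
--         for test_id in pending_tests:
--             for evidence_id in tests_by_id.get(test_id, {}).get("evidence_ids", []):
--                 if evidence_id not in evidence_ids:
--                     evidence_ids.add(evidence_id)
--                     new_evidence.append(evidence_id)
--         new_tests: list[str] = []
--         for evidence_id in pending_evidence + new_evidence:
--             for test_id in evidence_by_id.get(evidence_id, {}).get("test_ids", []):
--                 if test_id not in test_ids:
--                     test_ids.add(test_id)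
--                     new_tests.append(test_id)
--         pending_tests, pending_evidence = new_tests, []
--
--     return test_ids, evidence_ids
-- ===== Notes on version B (the rewrite author's own statement) =====
-- stated objective: alternative
-- what changed: A recomputes the closure by repeatedly rescanning the full test/evidence sets every round until the sizes stabilise; B keeps explicit worklists of newly-added ids and scans each id exactly once.
import Mathlib
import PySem

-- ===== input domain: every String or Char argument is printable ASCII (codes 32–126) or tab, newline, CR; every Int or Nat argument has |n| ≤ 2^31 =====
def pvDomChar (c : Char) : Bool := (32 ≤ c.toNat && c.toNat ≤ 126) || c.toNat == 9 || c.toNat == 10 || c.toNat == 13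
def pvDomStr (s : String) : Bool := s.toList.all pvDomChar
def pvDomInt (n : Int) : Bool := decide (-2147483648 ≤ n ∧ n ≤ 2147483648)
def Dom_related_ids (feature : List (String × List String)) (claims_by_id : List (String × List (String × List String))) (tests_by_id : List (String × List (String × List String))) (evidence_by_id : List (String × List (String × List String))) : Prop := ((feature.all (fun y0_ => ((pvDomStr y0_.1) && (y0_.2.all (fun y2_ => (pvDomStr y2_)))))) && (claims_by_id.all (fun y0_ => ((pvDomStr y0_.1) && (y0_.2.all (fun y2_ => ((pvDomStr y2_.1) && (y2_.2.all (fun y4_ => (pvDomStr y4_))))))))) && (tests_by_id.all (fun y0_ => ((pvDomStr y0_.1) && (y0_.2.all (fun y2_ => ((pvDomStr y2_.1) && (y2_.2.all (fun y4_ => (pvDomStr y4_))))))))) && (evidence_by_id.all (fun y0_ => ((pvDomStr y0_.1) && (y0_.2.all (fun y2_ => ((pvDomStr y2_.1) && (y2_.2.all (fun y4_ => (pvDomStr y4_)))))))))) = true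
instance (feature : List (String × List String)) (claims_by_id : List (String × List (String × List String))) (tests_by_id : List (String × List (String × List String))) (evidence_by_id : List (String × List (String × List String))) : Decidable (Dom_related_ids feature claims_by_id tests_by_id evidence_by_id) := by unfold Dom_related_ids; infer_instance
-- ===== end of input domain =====

-- B replaces A's repeated full rescans of both sets with a worklist that scans each id once
-- (objective: alternative). Both versions return the same pair of sets.

-- Shared transliteration helpers: d.get(k, {}).get(fld, []) and feature.get(k, []).
def pvLookup (d : List (String × List (String × List String))) (k fld : String) : List String :=
  PySem.Dict.getD (PySem.Dict.mk (PySem.Dict.getD (PySem.Dict.mk d) k [])) fld []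

def pvFeatGet (feature : List (String × List String)) (k : String) : List String :=
  PySem.Dict.getD (PySem.Dict.mk feature) k []

-- Fuel for the while loops: each non-final round strictly grows |T|+|E|, and every element
-- ever added comes from pvPool, so 2*|pvPool|+2 rounds always reach the fixpoint.
def pvPool (feature : List (String × List String)) (claims_by_id : List (String × List (String × List String))) (tests_by_id : List (String × List (String × List String))) (evidence_by_id : List (String × List (String × List String))) : List String :=
  feature.flatMap (·.2) ++ claims_by_id.flatMap (fun p => p.2.flatMap (·.2))
    ++ tests_by_id.flatMap (fun p => p.2.flatMap (·.2)) ++ evidence_by_id.flatMap (fun p => p.2.flatMap (·.2))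

def pvFuel (feature : List (String × List String)) (claims_by_id : List (String × List (String × List String))) (tests_by_id : List (String × List (String × List String))) (evidence_by_id : List (String × List (String × List String))) : Nat :=
  2 * (pvPool feature claims_by_id tests_by_id evidence_by_id).length + 2

-- ===== PORT A =====
-- the claim_ids loop: updates both sets
def pvInitA (feature : List (String × List String)) (claims_by_id : List (String × List (String × List String))) : PySem.Set String × PySem.Set String :=
  (pvFeatGet feature "claim_ids").foldl
    (fun s cid => (PySem.Set.update s.1 (pvLookup claims_by_id cid "test_ids"),
                   PySem.Set.update s.2 (pvLookup claims_by_id cid "evidence_ids")))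
    (PySem.Set.ofList (pvFeatGet feature "test_ids"), PySem.Set.empty)

-- one iteration of A's while body: both inner for loops
def pvRoundA (tb eb : List (String × List (String × List String))) (T E : PySem.Set String) : PySem.Set String × PySem.Set String :=
  let E' := T.foldl (fun E t => PySem.Set.update E (pvLookup tb t "evidence_ids")) E
  let T' := E'.foldl (fun T e => PySem.Set.update T (pvLookup eb e "test_ids")) T
  (T', E')

-- A's while loop, with fuel (proven sufficient: pvFuel bounds the number of rounds)
def pvLoopA (tb eb : List (String × List (String × List String))) : Nat → Option (Nat × Nat) → PySem.Set String → PySem.Set String → PySem.Set String × PySem.Set String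
  | 0, _, T, E => (T, E)
  | fuel+1, prev, T, E =>
    if prev = some (T.length, E.length) then (T, E)
    else pvLoopA tb eb fuel (some (T.length, E.length)) (pvRoundA tb eb T E).1 (pvRoundA tb eb T E).2

def related_ids (feature : List (String × List String)) (claims_by_id : List (String × List (String × List String))) (tests_by_id : List (String × List (String × List String))) (evidence_by_id : List (String × List (String × List String))) : List String × List String :=
  let s := pvInitA feature claims_by_id
  pvLoopA tests_by_id evidence_by_id (pvFuel feature claims_by_id tests_by_id evidence_by_id) none s.1 s.2

-- ===== PORT B =====
-- 'for x in l: if x not in s: s.add(x); out.append(x)'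
def pvAddAll (l : List String) (acc : PySem.Set String × List String) : PySem.Set String × List String :=
  l.foldl (fun acc x => if PySem.Set.contains acc.1 x then acc else (PySem.Set.add acc.1 x, acc.2 ++ [x])) acc

-- scan a frontier, collecting the newly added ids
def pvScan (g : String → List String) (front : List String) (s : PySem.Set String) : PySem.Set String × List String :=
  front.foldl (fun acc t => pvAddAll (g t) acc) (s, [])

-- B's worklist loop, with the same fuel
def pvLoopB (tb eb : List (String × List (String × List String))) : Nat → PySem.Set String → PySem.Set String → List String → List String → PySem.Set String × PySem.Set String
  | 0, T, E, _, _ => (T, E)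
  | fuel+1, T, E, ft, fe =>
    if ft = [] ∧ fe = [] then (T, E)
    else
      let p := pvScan (fun t => pvLookup tb t "evidence_ids") ft E
      let q := pvScan (fun e => pvLookup eb e "test_ids") (fe ++ p.2) T
      pvLoopB tb eb fuel q.1 p.1 q.2 []

def related_ids_alt (feature : List (String × List String)) (claims_by_id : List (String × List (String × List String))) (tests_by_id : List (String × List (String × List String))) (evidence_by_id : List (String × List (String × List String))) : List String × List String :=
  let st := pvAddAll (pvFeatGet feature "test_ids") (PySem.Set.empty, [])
  let s := (pvFeatGet feature "claim_ids").foldl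
    (fun (s : (PySem.Set String × List String) × (PySem.Set String × List String)) cid =>
      (pvAddAll (pvLookup claims_by_id cid "test_ids") s.1,
       pvAddAll (pvLookup claims_by_id cid "evidence_ids") s.2))
    (st, (PySem.Set.empty, []))
  pvLoopB tests_by_id evidence_by_id (pvFuel feature claims_by_id tests_by_id evidence_by_id) s.1.1 s.2.1 s.1.2 s.2.2

-- ===== PRECONDITION & SPEC =====
def Spec_related_ids (feature : List (String × List String)) (claims_by_id : List (String × List (String × List String))) (tests_by_id : List (String × List (String × List String))) (evidence_by_id : List (String × List (String × List String))) (out : List String × List String) : Prop := out = related_ids_alt feature claims_by_id tests_by_id evidence_by_id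
instance (feature : List (String × List String)) (claims_by_id : List (String × List (String × List String))) (tests_by_id : List (String × List (String × List String))) (evidence_by_id : List (String × List (String × List String))) (out : List String × List String) : Decidable (Spec_related_ids feature claims_by_id tests_by_id evidence_by_id out) := by unfold Spec_related_ids; infer_instance

-- ===== CLAIM (what is proved, stated in full; the proofs are below) =====
def Claim_equal_related_ids : Prop := ∀ (feature : List (String × List String)) (claims_by_id : List (String × List (String × List String))) (tests_by_id : List (String × List (String × List String))) (evidence_by_id : List (String × List (String × List String))), Dom_related_ids feature claims_by_id tests_by_id evidence_by_id → Spec_related_ids feature claims_by_id tests_by_id evidence_by_id (related_ids feature claims_by_id tests_by_id evidence_by_id)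

-- ===== LEMMAS AND PROOFS =====

-- abbreviation for "scan a list of keys, union in their adjacency lists"
def pvF (g : String → List String) (s : PySem.Set String) (l : List String) : PySem.Set String :=
  l.foldl (fun s t => PySem.Set.update s (g t)) s

theorem pvUpdate_noop (s : PySem.Set String) (xs : List String) (h : ∀ x ∈ xs, x ∈ s) :
    PySem.Set.update s xs = s := by
  rw [PySem.Set.update_eq_append_filter]
  have hf : List.filter (fun y => !s.contains y) (PySem.Set.ofList xs) = [] := by
    rw [List.filter_eq_nil_iff]
    intro a ha
    simp [h a ((PySem.Set.mem_ofList xs a).1 ha)]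
  rw [hf, List.append_nil]

theorem pvAddAll_shape (l : List String) : ∀ (s : PySem.Set String) (out : List String),
    ∃ d, pvAddAll l (s, out) = (s ++ d, out ++ d) ∧ s ++ d = PySem.Set.update s l := by
  induction l with
  | nil => intro s out; exact ⟨[], by simp [pvAddAll, PySem.Set.update_nil]⟩
  | cons a l ih =>
    intro s out
    rw [PySem.Set.update_cons]
    by_cases ha : a ∈ s
    · obtain ⟨d, hd1, hd2⟩ := ih s out
      refine ⟨d, ?_, by rw [hd2, PySem.Set.add_of_mem ha]⟩
      have : pvAddAll (a :: l) (s, out) = pvAddAll l (s, out) := by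
        simp only [pvAddAll, List.foldl_cons]
        congr 1
        simp [ha]
      rw [this, hd1]
    · obtain ⟨d, hd1, hd2⟩ := ih (s ++ [a]) (out ++ [a])
      refine ⟨[a] ++ d, ?_, ?_⟩
      · have : pvAddAll (a :: l) (s, out) = pvAddAll l (s ++ [a], out ++ [a]) := by
          simp only [pvAddAll, List.foldl_cons]
          congr 1
          simp [ha]
        rw [this, hd1]; simp
      · rw [PySem.Set.add_of_not_mem ha, ← hd2]; simp

theorem pvScanAux_shape (g : String → List String) (front : List String) :
    ∀ (s : PySem.Set String) (out : List String),
    ∃ d, front.foldl (fun acc t => pvAddAll (g t) acc) (s, out) = (s ++ d, out ++ d) ∧ s ++ d = pvF g s front := by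
  induction front with
  | nil => intro s out; exact ⟨[], by simp [pvF]⟩
  | cons t front ih =>
    intro s out
    obtain ⟨d1, hd1, hd2⟩ := pvAddAll_shape (g t) s out
    obtain ⟨d2, he1, he2⟩ := ih (s ++ d1) (out ++ d1)
    refine ⟨d1 ++ d2, ?_, ?_⟩
    · simp only [List.foldl_cons, hd1, he1, List.append_assoc]
    · simp only [pvF, List.foldl_cons, ← hd2, ← List.append_assoc]
      exact he2

theorem pvScan_shape (g : String → List String) (front : List String) (s : PySem.Set String) :
    ∃ d, pvScan g front s = (s ++ d, d) ∧ s ++ d = pvF g s front := by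
  obtain ⟨d, h1, h2⟩ := pvScanAux_shape g front s []
  exact ⟨d, by simpa [pvScan] using h1, h2⟩

theorem pvF_skip (g : String → List String) (done : List String) : ∀ (s : PySem.Set String),
    (∀ t ∈ done, ∀ x ∈ g t, x ∈ s) → pvF g s done = s := by
  induction done with
  | nil => intro s _; rfl
  | cons t done ih =>
    intro s h
    have h1 : PySem.Set.update s (g t) = s := pvUpdate_noop s (g t) (h t (by simp))
    simp only [pvF, List.foldl_cons, h1]
    exact ih s (fun t' ht' => h t' (by simp [ht']))

theorem pvMem_F (g : String → List String) (l : List String) : ∀ (s : PySem.Set String) (x : String),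
    x ∈ pvF g s l ↔ x ∈ s ∨ ∃ t ∈ l, x ∈ g t := by
  induction l with
  | nil => intro s x; simp [pvF]
  | cons t l ih =>
    intro s x
    simp only [pvF, List.foldl_cons]
    rw [show List.foldl (fun s t => PySem.Set.update s (g t)) (PySem.Set.update s (g t)) l = pvF g (PySem.Set.update s (g t)) l from rfl, ih]
    rw [PySem.Set.mem_update]
    constructor
    · rintro ((h | h) | ⟨t', ht', hx⟩)
      · exact Or.inl h
      · exact Or.inr ⟨t, by simp, h⟩
      · exact Or.inr ⟨t', by simp [ht'], hx⟩
    · rintro (h | ⟨t', ht', hx⟩)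
      · exact Or.inl (Or.inl h)
      · rcases List.mem_cons.1 ht' with h' | h'
        · subst h'; exact Or.inl (Or.inr hx)
        · exact Or.inr ⟨t', h', hx⟩

theorem pvNodup_F (g : String → List String) (l : List String) : ∀ (s : PySem.Set String),
    s.Nodup → (pvF g s l).Nodup := by
  induction l with
  | nil => intro s h; exact h
  | cons t l ih =>
    intro s h
    exact ih _ (PySem.Set.nodup_update s (g t) h)

theorem pvLoopA_stopped (tb eb : List (String × List (String × List String))) (T E : PySem.Set String)
    (hT : ∀ t ∈ T, ∀ x ∈ pvLookup tb t "evidence_ids", x ∈ E)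
    (hE : ∀ e ∈ E, ∀ x ∈ pvLookup eb e "test_ids", x ∈ T) :
    ∀ (f : Nat) (prev : Option (Nat × Nat)), pvLoopA tb eb f prev T E = (T, E) := by
  intro f
  induction f with
  | zero => intro prev; rfl
  | succ f ih =>
    intro prev
    show pvLoopA tb eb (f+1) prev T E = (T, E)
    rw [pvLoopA]
    by_cases hp : prev = some (T.length, E.length)
    · simp [hp]
    · have hE' : (pvRoundA tb eb T E).2 = E := pvF_skip _ T E hT
      have hT' : (pvRoundA tb eb T E).1 = T := by
        have h1 : (pvRoundA tb eb T E).2 = pvF (fun t => pvLookup tb t "evidence_ids") E T := rfl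
        have h2 : (pvRoundA tb eb T E).1 = pvF (fun e => pvLookup eb e "test_ids") T (pvRoundA tb eb T E).2 := rfl
        rw [h2, hE']
        exact pvF_skip _ E T hE
      simp only [hp, if_false, hT', hE']
      exact ih _

theorem pvLoop_eq (tb eb : List (String × List (String × List String))) (pool : List String)
    (hgT : ∀ t x, x ∈ pvLookup tb t "evidence_ids" → x ∈ pool)
    (hgE : ∀ e x, x ∈ pvLookup eb e "test_ids" → x ∈ pool) :
    ∀ (fA fB : Nat) (prev : Option (Nat × Nat)) (doneT ft doneE fe : List String),
    (doneT ++ ft).Nodup → (doneE ++ fe).Nodup →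
    (∀ x ∈ doneT ++ ft, x ∈ pool) → (∀ x ∈ doneE ++ fe, x ∈ pool) →
    (∀ t ∈ doneT, ∀ x ∈ pvLookup tb t "evidence_ids", x ∈ doneE ++ fe) →
    (∀ e ∈ doneE, ∀ x ∈ pvLookup eb e "test_ids", x ∈ doneT ++ ft) →
    (prev = some ((doneT ++ ft).length, (doneE ++ fe).length) → ft = [] ∧ fe = []) →
    2 * pool.length + 2 ≤ fA + ((doneT ++ ft).length + (doneE ++ fe).length) →
    2 * pool.length + 2 ≤ fB + ((doneT ++ ft).length + (doneE ++ fe).length) →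
    pvLoopA tb eb fA prev (doneT ++ ft) (doneE ++ fe) = pvLoopB tb eb fB (doneT ++ ft) (doneE ++ fe) ft fe := by
  intro fA
  induction fA with
  | zero =>
    intro fB prev doneT ft doneE fe hTnd hEnd hTp hEp hdT hdE hprev hfA hfB
    -- fuel 0 impossible: sizes ≤ 2*pool.length
    exfalso
    have h1 : (doneT ++ ft).length ≤ pool.length :=
      ((List.Nodup.subperm hTnd) (fun x hx => hTp x hx)).length_le
    have h2 : (doneE ++ fe).length ≤ pool.length :=
      ((List.Nodup.subperm hEnd) (fun x hx => hEp x hx)).length_le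
    omega
  | succ fA ih =>
    intro fB prev doneT ft doneE fe hTnd hEnd hTp hEp hdT hdE hprev hfA hfB
    set T := doneT ++ ft with hTdef
    set E := doneE ++ fe with hEdef
    by_cases hstop : ft = [] ∧ fe = []
    · obtain ⟨h1, h2⟩ := hstop
      subst h1; subst h2
      have hT : ∀ t ∈ T, ∀ x ∈ pvLookup tb t "evidence_ids", x ∈ E := by
        intro t ht; rw [hTdef] at ht; exact hdT t (by simpa using ht)
      have hE : ∀ e ∈ E, ∀ x ∈ pvLookup eb e "test_ids", x ∈ T := by
        intro e he; rw [hEdef] at he; exact hdE e (by simpa using he)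
      rw [pvLoopA_stopped tb eb T E hT hE]
      cases fB with
      | zero => rfl
      | succ fB => rw [pvLoopB]; simp
    · -- sizes bounded, so fuel positive
      have hszT : T.length ≤ pool.length := ((List.Nodup.subperm hTnd) (fun x hx => hTp x hx)).length_le
      have hszE : E.length ≤ pool.length := ((List.Nodup.subperm hEnd) (fun x hx => hEp x hx)).length_le
      obtain ⟨fB', rfl⟩ : ∃ fB', fB = fB' + 1 := ⟨fB - 1, by omega⟩
      have hprev' : ¬ prev = some (T.length, E.length) := fun h => hstop (hprev h)
      rw [pvLoopA, pvLoopB]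
      simp only [hprev', if_false, hstop, if_false]
      -- round analysis
      obtain ⟨dE, hp1, hp2⟩ := pvScan_shape (fun t => pvLookup tb t "evidence_ids") ft E
      have hE' : (pvRoundA tb eb T E).2 = E ++ dE := by
        have : (pvRoundA tb eb T E).2 = pvF (fun t => pvLookup tb t "evidence_ids") E T := rfl
        rw [this, hTdef, show pvF (fun t => pvLookup tb t "evidence_ids") E (doneT ++ ft)
            = pvF _ (pvF (fun t => pvLookup tb t "evidence_ids") E doneT) ft from List.foldl_append ..,
          pvF_skip _ doneT E hdT, ← hp2]
      obtain ⟨dT, hq1, hq2⟩ := pvScan_shape (fun e => pvLookup eb e "test_ids") (fe ++ dE) T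
      have hT' : (pvRoundA tb eb T E).1 = T ++ dT := by
        have h2' : (pvRoundA tb eb T E).1 = pvF (fun e => pvLookup eb e "test_ids") T (pvRoundA tb eb T E).2 := rfl
        rw [h2', hE', hEdef, List.append_assoc, show pvF (fun e => pvLookup eb e "test_ids") T (doneE ++ (fe ++ dE))
            = pvF _ (pvF (fun e => pvLookup eb e "test_ids") T doneE) (fe ++ dE) from List.foldl_append ..,
          pvF_skip _ doneE T hdE, ← hq2]
      rw [hp1, hq1, hT', hE']
      -- new invariants
      have hEeq : E ++ dE = pvF (fun t => pvLookup tb t "evidence_ids") E ft := hp2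
      have hTeq : T ++ dT = pvF (fun e => pvLookup eb e "test_ids") T (fe ++ dE) := hq2
      have hTnd' : (T ++ dT).Nodup := by rw [hTeq]; exact pvNodup_F _ _ _ hTnd
      have hEnd' : (E ++ dE).Nodup := by rw [hEeq]; exact pvNodup_F _ _ _ hEnd
      have hTp' : ∀ x ∈ T ++ dT, x ∈ pool := by
        intro x hx
        rw [hTeq] at hx
        rcases (pvMem_F _ _ _ _).1 hx with h | ⟨e, _, hxe⟩
        · exact hTp x h
        · exact hgE e x hxe
      have hEp' : ∀ x ∈ E ++ dE, x ∈ pool := by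
        intro x hx
        rw [hEeq] at hx
        rcases (pvMem_F _ _ _ _).1 hx with h | ⟨t, _, hxt⟩
        · exact hEp x h
        · exact hgT t x hxt
      have hdT' : ∀ t ∈ T, ∀ x ∈ pvLookup tb t "evidence_ids", x ∈ E ++ dE := by
        intro t ht x hx
        rcases List.mem_append.1 (hTdef ▸ ht) with h | h
        · exact List.mem_append.2 (Or.inl (hdT t h x hx))
        · rw [hEeq]; exact (pvMem_F _ _ _ _).2 (Or.inr ⟨t, h, hx⟩)
      have hdE' : ∀ e ∈ E ++ dE, ∀ x ∈ pvLookup eb e "test_ids", x ∈ T ++ dT := by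
        intro e he x hx
        rcases List.mem_append.1 he with h | h
        · rcases List.mem_append.1 (hEdef ▸ h : e ∈ doneE ++ fe) with h' | h'
          · exact List.mem_append.2 (Or.inl (hdE e h' x hx))
          · rw [hTeq]; exact (pvMem_F _ _ _ _).2 (Or.inr ⟨e, List.mem_append.2 (Or.inl h'), hx⟩)
        · rw [hTeq]; exact (pvMem_F _ _ _ _).2 (Or.inr ⟨e, List.mem_append.2 (Or.inr h), hx⟩)
      by_cases hprod : dT = [] ∧ dE = []
      · obtain ⟨h1, h2⟩ := hprod
        subst h1; subst h2
        simp only [List.append_nil]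
        have hT : ∀ t ∈ T, ∀ x ∈ pvLookup tb t "evidence_ids", x ∈ E := by
          simpa using hdT'
        have hE : ∀ e ∈ E, ∀ x ∈ pvLookup eb e "test_ids", x ∈ T := by
          simpa using hdE'
        rw [pvLoopA_stopped tb eb T E hT hE]
        cases fB' with
        | zero => rfl
        | succ fB'' => rw [pvLoopB]; simp
      · have hlen : 1 ≤ dT.length + dE.length := by
          rcases (not_and_or.1 hprod) with h | h
          · have := List.length_pos_iff.2 h; omega
          · have := List.length_pos_iff.2 h; omega
        have := ih fB' (some (T.length, E.length)) T dT (E ++ dE) []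
        simp only [List.append_nil] at this
        apply this hTnd' hEnd' hTp' hEp' hdT' (fun e he => hdE' e (by simpa using he))
        · intro h
          have h1 : (T ++ dT).length = T.length := by
            have := congrArg Prod.fst (Option.some.inj h); simpa using this.symm
          have : dT.length = 0 := by
            rw [List.length_append] at h1; omega
          exact ⟨List.length_eq_zero_iff.1 this, by trivial⟩
        · simp only [List.length_append] at *
          omega
        · simp only [List.length_append] at *
          omega

theorem pvLookup_pool (d : List (String × List (String × List String))) (k fld x : String)
    (h : x ∈ pvLookup d k fld) : x ∈ d.flatMap (fun p => p.2.flatMap (·.2)) := by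
  unfold pvLookup at h
  rw [PySem.Dict.getD_eq_get?_getD (PySem.Dict.mk d) k []] at h
  cases hg : (PySem.Dict.mk d).get? k with
  | none =>
    rw [hg] at h
    rw [PySem.Dict.getD_eq_get?_getD] at h
    simp only [Option.getD_none] at h
    cases hg2 : (PySem.Dict.mk ([] : List (String × List String))).get? fld with
    | none => rw [hg2] at h; simp at h
    | some v => exact absurd hg2 (by simp [PySem.Dict.get?])
  | some w =>
    rw [hg] at h
    simp only [Option.getD_some] at h
    rw [PySem.Dict.getD_eq_get?_getD] at h
    cases hg2 : (PySem.Dict.mk w).get? fld with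
    | none => rw [hg2] at h; simp at h
    | some v =>
      rw [hg2] at h
      exact List.mem_flatMap.2 ⟨(k, w), PySem.Dict.mem_items_of_get?_eq_some _ hg,
        List.mem_flatMap.2 ⟨(fld, v), PySem.Dict.mem_items_of_get?_eq_some _ hg2, h⟩⟩

theorem pvFeatGet_pool (feature : List (String × List String)) (k x : String)
    (h : x ∈ pvFeatGet feature k) : x ∈ feature.flatMap (·.2) := by
  unfold pvFeatGet at h
  rw [PySem.Dict.getD_eq_get?_getD] at h
  cases hg : (PySem.Dict.mk feature).get? k with
  | none => rw [hg] at h; simp at h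
  | some v =>
    rw [hg] at h
    exact List.mem_flatMap.2 ⟨(k, v), PySem.Dict.mem_items_of_get?_eq_some _ hg, h⟩

theorem pvAddAll_diag (l : List String) (s : PySem.Set String) :
    pvAddAll l (s, s) = (PySem.Set.update s l, PySem.Set.update s l) := by
  obtain ⟨d, h1, h2⟩ := pvAddAll_shape l s s
  rw [h1, h2]

theorem pvInitFold_diag (claims_by_id : List (String × List (String × List String))) (cids : List String) :
    ∀ (T0 E0 : PySem.Set String),
    cids.foldl
      (fun (s : (PySem.Set String × List String) × (PySem.Set String × List String)) cid =>
        (pvAddAll (pvLookup claims_by_id cid "test_ids") s.1,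
         pvAddAll (pvLookup claims_by_id cid "evidence_ids") s.2))
      ((T0, T0), (E0, E0))
    = (((cids.foldl (fun s cid => (PySem.Set.update s.1 (pvLookup claims_by_id cid "test_ids"),
                                   PySem.Set.update s.2 (pvLookup claims_by_id cid "evidence_ids"))) (T0, E0)).1,
        (cids.foldl (fun s cid => (PySem.Set.update s.1 (pvLookup claims_by_id cid "test_ids"),
                                   PySem.Set.update s.2 (pvLookup claims_by_id cid "evidence_ids"))) (T0, E0)).1),
       ((cids.foldl (fun s cid => (PySem.Set.update s.1 (pvLookup claims_by_id cid "test_ids"),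
                                   PySem.Set.update s.2 (pvLookup claims_by_id cid "evidence_ids"))) (T0, E0)).2,
        (cids.foldl (fun s cid => (PySem.Set.update s.1 (pvLookup claims_by_id cid "test_ids"),
                                   PySem.Set.update s.2 (pvLookup claims_by_id cid "evidence_ids"))) (T0, E0)).2)) := by
  induction cids with
  | nil => intro T0 E0; rfl
  | cons c cids ih =>
    intro T0 E0
    simp only [List.foldl_cons, pvAddAll_diag]
    exact ih _ _

theorem pvInitB_eq (feature : List (String × List String)) (claims_by_id : List (String × List (String × List String))) :
    (pvFeatGet feature "claim_ids").foldl
      (fun (s : (PySem.Set String × List String) × (PySem.Set String × List String)) cid =>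
        (pvAddAll (pvLookup claims_by_id cid "test_ids") s.1,
         pvAddAll (pvLookup claims_by_id cid "evidence_ids") s.2))
      (pvAddAll (pvFeatGet feature "test_ids") (PySem.Set.empty, []), (PySem.Set.empty, []))
    = (((pvInitA feature claims_by_id).1, (pvInitA feature claims_by_id).1),
       ((pvInitA feature claims_by_id).2, (pvInitA feature claims_by_id).2)) := by
  have h0 : pvAddAll (pvFeatGet feature "test_ids") (PySem.Set.empty, []) =
      (PySem.Set.ofList (pvFeatGet feature "test_ids"), PySem.Set.ofList (pvFeatGet feature "test_ids")) := by
    have := pvAddAll_diag (pvFeatGet feature "test_ids") []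
    simpa [PySem.Set.update_empty] using this
  rw [h0]
  exact pvInitFold_diag claims_by_id (pvFeatGet feature "claim_ids")
    (PySem.Set.ofList (pvFeatGet feature "test_ids")) PySem.Set.empty

theorem pvInitA_split (feature : List (String × List String)) (claims_by_id : List (String × List (String × List String))) :
    pvInitA feature claims_by_id =
      (pvF (fun cid => pvLookup claims_by_id cid "test_ids") (PySem.Set.ofList (pvFeatGet feature "test_ids")) (pvFeatGet feature "claim_ids"),
       pvF (fun cid => pvLookup claims_by_id cid "evidence_ids") PySem.Set.empty (pvFeatGet feature "claim_ids")) := by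
  suffices h : ∀ (cids : List String) (T0 E0 : PySem.Set String),
      cids.foldl (fun s cid => (PySem.Set.update s.1 (pvLookup claims_by_id cid "test_ids"),
                                PySem.Set.update s.2 (pvLookup claims_by_id cid "evidence_ids"))) (T0, E0)
      = (pvF (fun cid => pvLookup claims_by_id cid "test_ids") T0 cids,
         pvF (fun cid => pvLookup claims_by_id cid "evidence_ids") E0 cids) by
    exact h _ _ _
  intro cids
  induction cids with
  | nil => intro T0 E0; rfl
  | cons c cids ih =>
    intro T0 E0
    simp only [List.foldl_cons]
    exact ih _ _

theorem pvInitA_nodup (feature : List (String × List String)) (claims_by_id : List (String × List (String × List String))) :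
    (pvInitA feature claims_by_id).1.Nodup ∧ (pvInitA feature claims_by_id).2.Nodup := by
  rw [pvInitA_split]
  exact ⟨pvNodup_F _ _ _ (PySem.Set.nodup_ofList _), pvNodup_F _ _ _ List.nodup_nil⟩

theorem pvMem_pool_claims (feature : List (String × List String)) (claims_by_id : List (String × List (String × List String))) (tests_by_id : List (String × List (String × List String))) (evidence_by_id : List (String × List (String × List String))) (x : String)
    (h : x ∈ claims_by_id.flatMap (fun p => p.2.flatMap (·.2))) :
    x ∈ pvPool feature claims_by_id tests_by_id evidence_by_id := by
  simp only [pvPool, List.mem_append]; tauto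

theorem pvMem_pool_tests (feature : List (String × List String)) (claims_by_id : List (String × List (String × List String))) (tests_by_id : List (String × List (String × List String))) (evidence_by_id : List (String × List (String × List String))) (x : String)
    (h : x ∈ tests_by_id.flatMap (fun p => p.2.flatMap (·.2))) :
    x ∈ pvPool feature claims_by_id tests_by_id evidence_by_id := by
  simp only [pvPool, List.mem_append]; tauto

theorem pvMem_pool_evid (feature : List (String × List String)) (claims_by_id : List (String × List (String × List String))) (tests_by_id : List (String × List (String × List String))) (evidence_by_id : List (String × List (String × List String))) (x : String)
    (h : x ∈ evidence_by_id.flatMap (fun p => p.2.flatMap (·.2))) :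
    x ∈ pvPool feature claims_by_id tests_by_id evidence_by_id := by
  simp only [pvPool, List.mem_append]; tauto

theorem pvMem_pool_feat (feature : List (String × List String)) (claims_by_id : List (String × List (String × List String))) (tests_by_id : List (String × List (String × List String))) (evidence_by_id : List (String × List (String × List String))) (x : String)
    (h : x ∈ feature.flatMap (·.2)) :
    x ∈ pvPool feature claims_by_id tests_by_id evidence_by_id := by
  simp only [pvPool, List.mem_append]; tauto

theorem pvInitA_pool (feature : List (String × List String)) (claims_by_id : List (String × List (String × List String))) (tests_by_id : List (String × List (String × List String))) (evidence_by_id : List (String × List (String × List String))) :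
    (∀ x ∈ (pvInitA feature claims_by_id).1, x ∈ pvPool feature claims_by_id tests_by_id evidence_by_id) ∧
    (∀ x ∈ (pvInitA feature claims_by_id).2, x ∈ pvPool feature claims_by_id tests_by_id evidence_by_id) := by
  rw [pvInitA_split]
  constructor
  · intro x hx
    rcases (pvMem_F _ _ _ _).1 hx with h | ⟨c, _, hxc⟩
    · exact pvMem_pool_feat _ _ _ _ x (pvFeatGet_pool _ _ x ((PySem.Set.mem_ofList _ x).1 h))
    · exact pvMem_pool_claims _ _ _ _ x (pvLookup_pool _ _ _ x hxc)
  · intro x hx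
    rcases (pvMem_F _ _ _ _).1 hx with h | ⟨c, _, hxc⟩
    · simp [PySem.Set.empty] at h
    · exact pvMem_pool_claims _ _ _ _ x (pvLookup_pool _ _ _ x hxc)

-- ===== VERDICT (by name: the statement is the Claim_ definition above) =====
theorem related_ids_spec : Claim_equal_related_ids := by
  intro feature claims_by_id tests_by_id evidence_by_id _
  simp only [Spec_related_ids, related_ids, related_ids_alt]
  rw [pvInitB_eq feature claims_by_id]
  obtain ⟨hnd1, hnd2⟩ := pvInitA_nodup feature claims_by_id
  obtain ⟨hp1, hp2⟩ := pvInitA_pool feature claims_by_id tests_by_id evidence_by_id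
  have := pvLoop_eq tests_by_id evidence_by_id (pvPool feature claims_by_id tests_by_id evidence_by_id)
    (fun t x hx => pvMem_pool_tests _ _ _ _ x (pvLookup_pool _ _ _ x hx))
    (fun e x hx => pvMem_pool_evid _ _ _ _ x (pvLookup_pool _ _ _ x hx))
    (pvFuel feature claims_by_id tests_by_id evidence_by_id)
    (pvFuel feature claims_by_id tests_by_id evidence_by_id)
    none [] (pvInitA feature claims_by_id).1 [] (pvInitA feature claims_by_id).2
    (by simpa using hnd1) (by simpa using hnd2)
    (by simpa using hp1) (by simpa using hp2)
    (by intro t ht; simp at ht) (by intro e he; simp at he)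
    (by intro h; cases h)
    (by simp [pvFuel]) (by simp [pvFuel])
  simpa using this
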